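-- pv_equiv track=rewrite | github.com/sohamm17/pipe_schedule | pipeline.py | end_to_end_delay_durr_periods_orig
-- ===== SOURCE A (Python) =====
-- def end_to_end_delay_durr_periods_orig(periods):
--     e2e_ub = 0
--     N = len(periods)
--     for i in range(0, N - 1):
--         # If next task is of lower priority (higher or equal period), then I = 0
--         if periods[i + 1] >= periods[i]:
--             e2e_ub += periods[i + 1]
--         else:
--             e2e_ub += periods[i + 1] + periods[i]
--         # print (i, e2e_ub)
--     # add the period of first and last tasks
--     # print (periods, "E2E: ", int(e2e_ub + periods[0] + periods[N - 1]))
--     return int(e2e_ub + periods[0] + periods[N - 1])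
-- ===== SOURCE B (Python) =====
-- def end_to_end_delay_durr_periods_orig(periods):
--     total = sum(periods) + periods[-1]
--     extra = sum(periods[i] for i in range(len(periods) - 1)
--                 if periods[i + 1] < periods[i])
--     return int(total + extra)
-- ===== Notes on version B (the rewrite author's own statement) =====
-- stated objective: simpler
-- what changed: Replaces the fused accumulation loop with a closed regrouping: whole-list sum plus last element, plus one filtered pass over consecutive pairs that adds periods[i] where the next period is smaller.
import Mathlib
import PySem

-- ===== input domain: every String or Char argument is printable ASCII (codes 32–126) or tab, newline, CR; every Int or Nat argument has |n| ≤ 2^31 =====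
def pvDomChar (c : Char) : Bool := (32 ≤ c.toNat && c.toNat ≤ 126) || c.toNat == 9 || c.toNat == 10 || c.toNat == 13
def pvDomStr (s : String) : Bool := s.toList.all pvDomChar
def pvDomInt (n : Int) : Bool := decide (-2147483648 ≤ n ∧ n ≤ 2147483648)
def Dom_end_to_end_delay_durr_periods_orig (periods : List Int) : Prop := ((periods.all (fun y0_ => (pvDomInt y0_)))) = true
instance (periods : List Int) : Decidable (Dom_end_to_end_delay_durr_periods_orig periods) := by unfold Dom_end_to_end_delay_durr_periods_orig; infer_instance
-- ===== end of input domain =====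

-- B replaces A's fused accumulation loop by a whole-list sum plus one filtered pass
-- over consecutive pairs (objective: simpler); return value only.


-- ===== PORT A =====
def end_to_end_delay_durr_periods_orig (periods : List Int) : Int :=
  let N : Int := periods.length
  let e2e_ub : Int :=
    (PySem.List.pyRange 0 (N - 1) 1).foldl
      (fun acc i =>
        if PySem.List.pyGetD periods (i + 1) 0 ≥ PySem.List.pyGetD periods i 0 then
          acc + PySem.List.pyGetD periods (i + 1) 0
        else
          acc + PySem.List.pyGetD periods (i + 1) 0 + PySem.List.pyGetD periods i 0) 0
  e2e_ub + PySem.List.pyGetD periods 0 0 + PySem.List.pyGetD periods (N - 1) 0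

-- ===== PORT B =====
def end_to_end_delay_durr_periods_orig_alt (periods : List Int) : Int :=
  let total : Int := periods.sum + PySem.List.pyGetD periods (-1) 0
  let extra : Int :=
    (((PySem.List.pyRange 0 ((periods.length : Int) - 1) 1).filter
        (fun i => PySem.List.pyGetD periods (i + 1) 0 < PySem.List.pyGetD periods i 0)).map
      (fun i => PySem.List.pyGetD periods i 0)).sum
  total + extra

-- ===== PRECONDITION & SPEC =====
-- Pre_ excludes the empty list, on which A (and B) raise IndexError when reading the last element.
def Pre_end_to_end_delay_durr_periods_orig (periods : List Int) : Prop := periods ≠ []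
instance (periods : List Int) : Decidable (Pre_end_to_end_delay_durr_periods_orig periods) := by unfold Pre_end_to_end_delay_durr_periods_orig; infer_instance
def pvWitness_end_to_end_delay_durr_periods_orig : List Int := [5, 3, 7]

def Spec_end_to_end_delay_durr_periods_orig (periods : List Int) (out : Int) : Prop := out = end_to_end_delay_durr_periods_orig_alt periods
instance (periods : List Int) (out : Int) : Decidable (Spec_end_to_end_delay_durr_periods_orig periods out) := by unfold Spec_end_to_end_delay_durr_periods_orig; infer_instance

-- ===== CLAIM (what is proved, stated in full; the proofs are below) =====
def Claim_equal_end_to_end_delay_durr_periods_orig : Prop := ∀ (periods : List Int), Dom_end_to_end_delay_durr_periods_orig periods → Pre_end_to_end_delay_durr_periods_orig periods → Spec_end_to_end_delay_durr_periods_orig periods (end_to_end_delay_durr_periods_orig periods)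

-- ===== LEMMAS AND PROOFS =====

theorem pyGetD_last (l : List Int) (h : l ≠ []) :
    PySem.List.pyGetD l ((l.length : Int) - 1) 0 = PySem.List.pyGetD l (-1) 0 := by
  have hl : 0 < l.length := List.length_pos_iff.mpr h
  simp only [PySem.List.pyGetD, PySem.List.pyGet?, PySem.List.pyIdx?]
  rw [if_pos (by omega), if_pos (by omega), if_neg (by omega), if_pos (by omega)]
  have h2 : ((l.length : Int) - 1).toNat = l.length - 1 := by omega
  have h3 : (-(-1:Int)).toNat = 1 := by omega
  rw [h2, h3]

theorem sum_ite_filter (l : List (Int × Int)) (p : Int × Int → Bool) :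
    (l.map (fun q => if p q then q.1 else 0)).sum
    = ((l.filter p).map (·.1)).sum := by
  induction l with
  | nil => simp
  | cons a t ih => by_cases h : p a <;> simp [h, ih]


def Gfun : Int → Int × Int → Int := fun acc p => if p.2 ≥ p.1 then acc + p.2 else acc + p.2 + p.1
def cZ : Int × Int → Bool := fun p => decide (p.2 < p.1)

theorem pv_main : ∀ l : List Int, l ≠ [] → end_to_end_delay_durr_periods_orig l = end_to_end_delay_durr_periods_orig_alt l := by
  intro l hne
  have hl : 0 < l.length := List.length_pos_iff.mpr hne
  simp only [end_to_end_delay_durr_periods_orig, end_to_end_delay_durr_periods_orig_alt]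
  set Z := l.zip l.tail with hZ
  have hZlen : Z.length = l.length - 1 := by simp [hZ, List.length_zip]
  have zrw : ((l.length : Int) - 1) = (Z.length : Int) := by omega
  have hidx : ∀ i : Int, i ∈ PySem.List.pyRange 0 (Z.length : Int) 1 →
      PySem.List.pyGetD l i 0 = (PySem.List.pyGetD Z i ((0:Int),(0:Int))).1 ∧
      PySem.List.pyGetD l (i + 1) 0 = (PySem.List.pyGetD Z i ((0:Int),(0:Int))).2 := by
    intro i hi
    obtain ⟨h0, h1⟩ := (PySem.List.mem_pyRange_one).mp hi
    have hiN : i.toNat < Z.length := by omega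
    have hiL : i.toNat < l.length := by omega
    have hiL1 : i.toNat + 1 < l.length := by omega
    rw [PySem.List.pyGetD_eq_getElem Z ((0:Int),(0:Int)) h0 (by omega),
        PySem.List.pyGetD_eq_getElem l 0 h0 (by omega),
        PySem.List.pyGetD_eq_getElem l 0 (by omega) (by omega)]
    have h1N : (i + 1).toNat = i.toNat + 1 := by omega
    simp [hZ, List.getElem_zip, List.getElem_tail, h1N]
  rw [zrw]
  -- A's fold over indices = fold over Z
  rw [PySem.List.foldl_congr_mem _ _
      (fun acc i => Gfun acc (PySem.List.pyGetD Z i ((0:Int),(0:Int)))) 0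
      (by
        intro acc i hi
        obtain ⟨e1, e2⟩ := hidx i hi
        simp only [Gfun, e1, e2])]
  rw [← List.foldl_map (f := fun i => PySem.List.pyGetD Z i ((0:Int),(0:Int))) (g := Gfun),
      PySem.List.map_pyGetD_pyRange_zero']
  -- B's filter/map over indices = over Z
  rw [List.filter_congr (fun i hi => by
        obtain ⟨e1, e2⟩ := hidx i hi
        simp only [cZ, Function.comp, e1, e2] :
      ∀ i ∈ PySem.List.pyRange 0 (Z.length : Int) 1,
        (decide (PySem.List.pyGetD l (i + 1) 0 < PySem.List.pyGetD l i 0))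
        = (cZ ∘ (fun i => PySem.List.pyGetD Z i ((0:Int),(0:Int)))) i)]
  rw [List.map_congr_left (fun i hi => by
        obtain ⟨e1, _⟩ := hidx i (List.mem_of_mem_filter hi)
        simp only [e1, Function.comp] :
      ∀ i ∈ (PySem.List.pyRange 0 (Z.length : Int) 1).filter
          (cZ ∘ (fun i => PySem.List.pyGetD Z i ((0:Int),(0:Int)))),
        PySem.List.pyGetD l i 0
        = (Prod.fst ∘ (fun i => PySem.List.pyGetD Z i ((0:Int),(0:Int)))) i)]
  rw [← List.map_map, ← List.filter_map, PySem.List.map_pyGetD_pyRange_zero']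
  -- fold over Z = sum of per-pair contributions
  rw [PySem.List.foldl_congr_mem Z Gfun
      (fun acc p => acc + (p.2 + if cZ p then p.1 else 0)) 0
      (by
        intro acc p _
        simp only [Gfun, cZ, decide_eq_true_eq]
        split_ifs <;> omega)]
  rw [PySem.List.foldl_add Z (fun p => p.2 + if cZ p then p.1 else 0) 0]
  rw [PySem.List.sum_map_add_int Z Prod.snd (fun p => if cZ p then p.1 else 0)]
  rw [sum_ite_filter Z cZ]
  rw [List.map_snd_zip (by simp [List.length_tail])]
  -- last element: index N-1 equals index -1
  rw [← zrw, pyGetD_last l hne]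
  have hhead : PySem.List.pyGetD l 0 0 = l.head hne := by
    rw [PySem.List.pyGetD_eq_getElem l 0 (by omega) (by omega)]
    exact List.getElem_zero_eq_head hl
  have hsum : l.sum = l.head hne + l.tail.sum := by
    conv_lhs => rw [← List.cons_head_tail hne]
    rw [List.sum_cons]
  rw [hhead, hsum]
  ring

-- ===== VERDICT (by name: the statement is the Claim_ definition above) =====
theorem end_to_end_delay_durr_periods_orig_spec : Claim_equal_end_to_end_delay_durr_periods_orig := by
  intro l _ hpre
  unfold Spec_end_to_end_delay_durr_periods_orig
  exact pv_main l hpre
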